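-- pv_equiv track=rewrite | github.com/DazhuangJammy/DazhuangSkill-Creator | scripts/utils.py | _split_inline_yaml_sequence
-- ===== SOURCE A (Python) =====
-- def _split_inline_yaml_sequence(value: str) -> list[str]:
--     """Split a flow-style YAML sequence body into item strings."""
--     items: list[str] = []
--     current: list[str] = []
--     in_single = False
--     in_double = False
--     escaped = False
--     bracket_depth = 0
--     brace_depth = 0
--
--     for char in value:
--         if char == "\\" and in_double and not escaped:
--             escaped = True
--             current.append(char)
--             continue
--         if char == "'" and not in_double and not escaped:
--             in_single = not in_single
--         elif char == '"' and not in_single and not escaped: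
--             in_double = not in_double
--         elif not in_single and not in_double:
--             if char == "[":
--                 bracket_depth += 1
--             elif char == "]":
--                 if bracket_depth == 0:
--                     raise ValueError(f"Invalid inline YAML sequence: [{value}]")
--                 bracket_depth -= 1
--             elif char == "{":
--                 brace_depth += 1
--             elif char == "}":
--                 if brace_depth == 0:
--                     raise ValueError(f"Invalid inline YAML sequence: [{value}]")
--                 brace_depth -= 1
--             elif char == "," and bracket_depth == 0 and brace_depth == 0:
--                 item = "".join(current).strip()
--                 if not item:
--                     raise ValueError(f"Empty item in inline YAML sequence: [{value}]")
--                 items.append(item)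
--                 current = []
--                 continue
--         current.append(char)
--         escaped = False
--
--     if in_single or in_double or bracket_depth != 0 or brace_depth != 0:
--         raise ValueError(f"Unterminated inline YAML sequence: [{value}]")
--
--     tail = "".join(current).strip()
--     if not tail:
--         raise ValueError(f"Empty item in inline YAML sequence: [{value}]")
--     items.append(tail)
--     return items
-- ===== SOURCE B (Python) =====
-- def _split_inline_yaml_sequence(value: str) -> list[str]:
--     """Split a flow-style YAML sequence body into item strings.
--
--     Index-based scanner: quoted spans are consumed by inner loops instead of
--     per-character quote-state flags."""
--     items: list[str] = []
--     current: list[str] = []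
--     bracket_depth = 0
--     brace_depth = 0
--     closed = True
--     i = 0
--     n = len(value)
--     while i < n:
--         ch = value[i]
--         if ch == "'":
--             current.append(ch)
--             i += 1
--             while i < n and value[i] != "'":
--                 current.append(value[i])
--                 i += 1
--             if i == n:
--                 closed = False
--                 break
--             current.append("'")
--             i += 1
--         elif ch == '"':
--             current.append(ch)
--             i += 1
--             while i < n and value[i] != '"':
--                 if value[i] == "\\":
--                     current.append("\\")
--                     i += 1
--                     if i == n:
--                         break
--                 current.append(value[i])
--                 i += 1
--             if i == n:
--                 closed = False
--                 break
--             current.append('"')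
--             i += 1
--         else:
--             if ch == "[":
--                 bracket_depth += 1
--             elif ch == "]":
--                 if bracket_depth == 0:
--                     raise ValueError(f"Invalid inline YAML sequence: [{value}]")
--                 bracket_depth -= 1
--             elif ch == "{":
--                 brace_depth += 1
--             elif ch == "}":
--                 if brace_depth == 0:
--                     raise ValueError(f"Invalid inline YAML sequence: [{value}]")
--                 brace_depth -= 1
--             elif ch == "," and bracket_depth == 0 and brace_depth == 0:
--                 item = "".join(current).strip()
--                 if not item:
--                     raise ValueError(f"Empty item in inline YAML sequence: [{value}]")
--                 items.append(item)
--                 current = []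
--                 i += 1
--                 continue
--             current.append(ch)
--             i += 1
--     if not closed or bracket_depth != 0 or brace_depth != 0:
--         raise ValueError(f"Unterminated inline YAML sequence: [{value}]")
--     tail = "".join(current).strip()
--     if not tail:
--         raise ValueError(f"Empty item in inline YAML sequence: [{value}]")
--     items.append(tail)
--     return items
-- ===== Notes on version B (the rewrite author's own statement) =====
-- stated objective: alternative
-- what changed: Replaces A's per-character quote/escape flag machine (in_single/in_double/escaped threaded through every iteration) by an index-based scanner whose inner while-loops consume whole quoted spans, so the main loop handles only depth counters and top-level commas; it trades the flag state for explicit span consumption at the same O(n) cost.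
import Mathlib
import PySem

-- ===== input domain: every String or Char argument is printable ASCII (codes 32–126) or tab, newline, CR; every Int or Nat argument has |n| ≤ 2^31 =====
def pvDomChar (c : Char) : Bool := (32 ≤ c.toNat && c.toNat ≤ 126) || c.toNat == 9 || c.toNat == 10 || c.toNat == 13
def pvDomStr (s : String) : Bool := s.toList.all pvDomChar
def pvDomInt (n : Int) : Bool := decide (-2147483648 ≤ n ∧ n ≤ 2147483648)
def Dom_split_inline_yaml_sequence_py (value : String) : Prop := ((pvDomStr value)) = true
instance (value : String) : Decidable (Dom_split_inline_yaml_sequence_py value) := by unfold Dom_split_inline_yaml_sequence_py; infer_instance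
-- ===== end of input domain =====

-- B replaces A's per-character quote/escape flag machine by an index-style scanner whose inner
-- loops consume whole quoted spans (objective: alternative decomposition; same cost). A raises
-- ValueError on malformed input; those inputs are excluded by Pre_ below.

-- ===== PORT A =====
-- A's loop state: (items, current, in_single, in_double, escaped, bracket_depth, brace_depth);
-- none = a ValueError raised inside the loop.
def aLoop : List Char → List String → List Char → Bool → Bool → Bool → Nat → Nat →
    Option (List String × List Char × Bool × Bool × Nat × Nat)
  | [], items, cur, insng, indbl, _esc, bd, brd => some (items, cur, insng, indbl, bd, brd)
  | c :: cs, items, cur, insng, indbl, esc, bd, brd =>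
    if c = '\\' ∧ indbl = true ∧ esc = false then
      aLoop cs items (cur ++ [c]) insng indbl true bd brd
    else if c = '\'' ∧ indbl = false ∧ esc = false then
      aLoop cs items (cur ++ [c]) (!insng) indbl false bd brd
    else if c = '"' ∧ insng = false ∧ esc = false then
      aLoop cs items (cur ++ [c]) insng (!indbl) false bd brd
    else if insng = false ∧ indbl = false then
      if c = '[' then aLoop cs items (cur ++ [c]) insng indbl false (bd + 1) brd
      else if c = ']' then
        if bd = 0 then none else aLoop cs items (cur ++ [c]) insng indbl false (bd - 1) brd
      else if c = '{' then aLoop cs items (cur ++ [c]) insng indbl false bd (brd + 1)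
      else if c = '}' then
        if brd = 0 then none else aLoop cs items (cur ++ [c]) insng indbl false bd (brd - 1)
      else if c = ',' ∧ bd = 0 ∧ brd = 0 then
        let item := PySem.Chars.strip cur
        if item = [] then none else aLoop cs (items ++ [String.mk item]) [] insng indbl esc bd brd
      else aLoop cs items (cur ++ [c]) insng indbl false bd brd
    else aLoop cs items (cur ++ [c]) insng indbl false bd brd

-- the code after A's loop (the raises return []; all raising inputs are outside Pre_)
def aFinish : Option (List String × List Char × Bool × Bool × Nat × Nat) → List String
  | none => []
  | some (items, cur, insng, indbl, bd, brd) =>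
    if insng = true ∨ indbl = true ∨ bd ≠ 0 ∨ brd ≠ 0 then []
    else
      let tail := PySem.Chars.strip cur
      if tail = [] then [] else items ++ [String.mk tail]

def split_inline_yaml_sequence_py (value : String) : List String :=
  aFinish (aLoop value.toList [] [] false false false 0 0)

-- ===== PORT B =====
-- inner loop of B for a single-quoted span: returns (current', rest) past the closing quote,
-- none = the quote is never closed (B's `closed = False; break`)
def bSingle : List Char → List Char → Option (List Char × List Char)
  | [], _cur => none
  | c :: cs, cur => if c = '\'' then some (cur ++ [c], cs) else bSingle cs (cur ++ [c])

-- inner loop of B for a double-quoted span (a backslash copies itself and the next char)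
def bDouble : List Char → List Char → Option (List Char × List Char)
  | [], _cur => none
  | c :: cs, cur =>
    if c = '"' then some (cur ++ [c], cs)
    else if c = '\\' then
      match cs with
      | [] => none
      | d :: cs' => bDouble cs' (cur ++ [c, d])
    else bDouble cs (cur ++ [c])

theorem bSingle_rest_lt : ∀ (cs cur cur' rest : List Char),
    bSingle cs cur = some (cur', rest) → rest.length < cs.length := by
  intro cs
  induction cs with
  | nil => simp [bSingle]
  | cons c cs ih =>
    intro cur cur' rest h
    by_cases hc : c = '\''
    · simp [bSingle, hc] at h
      simp [← h.2]
    · simp [bSingle, hc] at h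
      exact Nat.lt_succ_of_lt (ih _ _ _ h)

theorem bDouble_rest_lt_aux : ∀ (n : Nat) (cs cur cur' rest : List Char),
    cs.length ≤ n → bDouble cs cur = some (cur', rest) → rest.length < cs.length := by
  intro n
  induction n with
  | zero =>
    rintro (_ | ⟨c, cs⟩) cur cur' rest hle h
    · simp [bDouble] at h
    · simp at hle
  | succ n ih =>
    rintro (_ | ⟨c, cs⟩) cur cur' rest hle h
    · simp [bDouble] at h
    · rw [bDouble.eq_def] at h
      by_cases hq : c = '"'
      · simp [hq] at h
        simp [← h.2]
      · by_cases hb : c = '\\'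
        · match cs with
          | [] => simp [hb] at h
          | d :: cs' =>
            simp [hb] at h
            have := ih cs' _ _ _ (by simp at hle ⊢; omega) h
            simp; omega
        · simp [hq, hb] at h
          have := ih cs _ _ _ (by simp at hle; omega) h
          exact Nat.lt_succ_of_lt this

theorem bDouble_rest_lt (cs cur cur' rest : List Char)
    (h : bDouble cs cur = some (cur', rest)) : rest.length < cs.length :=
  bDouble_rest_lt_aux cs.length cs cur cur' rest (Nat.le_refl _) h

-- B's main while-loop; none = a ValueError raised (invalid / empty item / unterminated quote)
def bLoop : List Char → List String → List Char → Nat → Nat →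
    Option (List String × List Char × Nat × Nat)
  | [], items, cur, bd, brd => some (items, cur, bd, brd)
  | c :: cs, items, cur, bd, brd =>
    if c = '\'' then
      match h : bSingle cs (cur ++ [c]) with
      | none => none
      | some (cur', rest) => bLoop rest items cur' bd brd
    else if c = '"' then
      match h : bDouble cs (cur ++ [c]) with
      | none => none
      | some (cur', rest) => bLoop rest items cur' bd brd
    else if c = '[' then bLoop cs items (cur ++ [c]) (bd + 1) brd
    else if c = ']' then
      if bd = 0 then none else bLoop cs items (cur ++ [c]) (bd - 1) brd
    else if c = '{' then bLoop cs items (cur ++ [c]) bd (brd + 1)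
    else if c = '}' then
      if brd = 0 then none else bLoop cs items (cur ++ [c]) bd (brd - 1)
    else if c = ',' ∧ bd = 0 ∧ brd = 0 then
      let item := PySem.Chars.strip cur
      if item = [] then none else bLoop cs (items ++ [String.mk item]) [] bd brd
    else bLoop cs items (cur ++ [c]) bd brd
  termination_by cs _ _ _ _ => cs.length
  decreasing_by
    · exact Nat.lt_succ_of_lt (bSingle_rest_lt _ _ _ _ h)
    · exact Nat.lt_succ_of_lt (bDouble_rest_lt _ _ _ _ h)
    all_goals simp

-- the code after B's loop
def bFinish : Option (List String × List Char × Nat × Nat) → List String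
  | none => []
  | some (items, cur, bd, brd) =>
    if bd ≠ 0 ∨ brd ≠ 0 then []
    else
      let tail := PySem.Chars.strip cur
      if tail = [] then [] else items ++ [String.mk tail]

def split_inline_yaml_sequence_py_alt (value : String) : List String :=
  bFinish (bLoop value.toList [] [] 0 0)

-- ===== PRECONDITION & SPEC =====
-- Pre_ = the value is a well-formed flow-sequence body: quotes terminated, brackets/braces
-- balanced without underflow, and every top-level comma-separated item contains a
-- non-whitespace character — exactly the inputs on which A returns (elsewhere A raises ValueError).
-- state: mode 0 = plain, 1 = in single quotes, 2 = in double quotes, 3 = after backslash in double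
def pvWf : List Char → Nat → Nat → Nat → Bool → Bool
  | [], mode, bd, brd, seen => mode == 0 && bd == 0 && brd == 0 && seen
  | c :: cs, mode, bd, brd, seen =>
    if mode = 1 then pvWf cs (if c = '\'' then 0 else 1) bd brd true
    else if mode = 2 then pvWf cs (if c = '\\' then 3 else if c = '"' then 0 else 2) bd brd true
    else if mode = 3 then pvWf cs 2 bd brd true
    else if c = '\'' then pvWf cs 1 bd brd true
    else if c = '"' then pvWf cs 2 bd brd true
    else if c = '[' then pvWf cs 0 (bd + 1) brd true
    else if c = ']' then bd != 0 && pvWf cs 0 (bd - 1) brd true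
    else if c = '{' then pvWf cs 0 bd (brd + 1) true
    else if c = '}' then brd != 0 && pvWf cs 0 bd (brd - 1) true
    else if c = ',' ∧ bd = 0 ∧ brd = 0 then seen && pvWf cs 0 0 0 false
    else pvWf cs 0 bd brd (seen || !(PySem.Chars.isspace c))

def Pre_split_inline_yaml_sequence_py (value : String) : Prop :=
  pvWf value.toList 0 0 0 false = true
instance (value : String) : Decidable (Pre_split_inline_yaml_sequence_py value) := by
  unfold Pre_split_inline_yaml_sequence_py; infer_instance

def pvWitness_split_inline_yaml_sequence_py : String := "a, 'b, c', [1, 2]"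

def Spec_split_inline_yaml_sequence_py (value : String) (out : List String) : Prop := out = split_inline_yaml_sequence_py_alt value
instance (value : String) (out : List String) : Decidable (Spec_split_inline_yaml_sequence_py value out) := by unfold Spec_split_inline_yaml_sequence_py; infer_instance

-- ===== CLAIM (what is proved, stated in full; the proofs are below) =====
def Claim_equal_split_inline_yaml_sequence_py : Prop := ∀ (value : String), Dom_split_inline_yaml_sequence_py value → Pre_split_inline_yaml_sequence_py value → Spec_split_inline_yaml_sequence_py value (split_inline_yaml_sequence_py value)

-- ===== LEMMAS AND PROOFS =====

-- one-step equations for bLoop on a quote character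
theorem bLoop_cons_single (cs : List Char) (items : List String) (cur : List Char) (bd brd : Nat) :
    bLoop ('\'' :: cs) items cur bd brd =
      match bSingle cs (cur ++ ['\'']) with
      | none => none
      | some (cur', rest) => bLoop rest items cur' bd brd := by
  rw [bLoop.eq_def]
  simp only [reduceIte]
  split
  · next heq => simp [heq]
  · next cur' rest heq => simp [heq]

theorem bLoop_cons_double (cs : List Char) (items : List String) (cur : List Char) (bd brd : Nat) :
    bLoop ('"' :: cs) items cur bd brd =
      match bDouble cs (cur ++ ['"']) with
      | none => none
      | some (cur', rest) => bLoop rest items cur' bd brd := by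
  rw [bLoop.eq_def]
  simp only [reduceIte]
  simp only [show ¬('"' = '\'') by decide, if_false]
  split
  · next heq => simp [heq]
  · next cur' rest heq => simp [heq]

-- A in the single-quote state consumes exactly the span bSingle consumes
theorem aLoop_single : ∀ (cs : List Char) (items : List String) (cur : List Char) (bd brd : Nat),
    aFinish (aLoop cs items cur true false false bd brd) =
      match bSingle cs cur with
      | none => []
      | some (cur', rest) => aFinish (aLoop rest items cur' false false false bd brd) := by
  intro cs
  induction cs with
  | nil => intro items cur bd brd; simp [aLoop, bSingle, aFinish]
  | cons c cs ih =>
    intro items cur bd brd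
    rw [aLoop.eq_def, bSingle.eq_def]
    by_cases hc : c = '\''
    · simp [hc]
    · simp [hc, ih]

-- A in the double-quote state consumes exactly the span bDouble consumes
theorem aLoop_double_aux : ∀ (n : Nat) (cs : List Char) (items : List String) (cur : List Char)
    (bd brd : Nat), cs.length ≤ n →
    aFinish (aLoop cs items cur false true false bd brd) =
      match bDouble cs cur with
      | none => []
      | some (cur', rest) => aFinish (aLoop rest items cur' false false false bd brd) := by
  intro n
  induction n with
  | zero =>
    rintro (_ | ⟨c, cs⟩) items cur bd brd hle
    · simp [aLoop, bDouble, aFinish]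
    · simp at hle
  | succ n ih =>
    rintro (_ | ⟨c, cs⟩) items cur bd brd hle
    · simp [aLoop, bDouble, aFinish]
    · rw [aLoop.eq_def, bDouble.eq_def]
      by_cases hb : c = '\\'
      · subst hb
        match cs with
        | [] => simp [aLoop, aFinish]
        | d :: cs' =>
          have h2 := ih cs' items (cur ++ ['\\', d]) bd brd (by simp at hle ⊢; omega)
          simp [aLoop, h2]
      · by_cases hq : c = '"'
        · simp [hq]
        · have h2 := ih cs items (cur ++ [c]) bd brd (by simp at hle; omega)
          simp [hq, hb, h2]

theorem aLoop_double (cs : List Char) (items : List String) (cur : List Char) (bd brd : Nat) :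
    aFinish (aLoop cs items cur false true false bd brd) =
      match bDouble cs cur with
      | none => []
      | some (cur', rest) => aFinish (aLoop rest items cur' false false false bd brd) :=
  aLoop_double_aux cs.length cs items cur bd brd (Nat.le_refl _)

theorem main_sim_aux : ∀ (n : Nat) (cs : List Char) (items : List String) (cur : List Char)
    (bd brd : Nat), cs.length ≤ n →
    aFinish (aLoop cs items cur false false false bd brd) =
      bFinish (bLoop cs items cur bd brd) := by
  intro n
  induction n with
  | zero =>
    rintro (_ | ⟨c, cs⟩) items cur bd brd hle
    · simp [aLoop, bLoop, aFinish, bFinish]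
    · simp at hle
  | succ n ih =>
    rintro (_ | ⟨c, cs⟩) items cur bd brd hle
    · simp [aLoop, bLoop, aFinish, bFinish]
    · have hle' : cs.length ≤ n := by simp at hle; omega
      by_cases h1 : c = '\''
      · subst h1
        rw [bLoop_cons_single]
        have h0 := aLoop_single cs items (cur ++ ['\'']) bd brd
        conv_lhs => rw [aLoop.eq_def]
        cases hbs : bSingle cs (cur ++ ['\'']) with
        | none =>
          rw [hbs] at h0; simp at h0
          simp [hbs, bFinish, h0]
        | some p =>
          obtain ⟨cur', rest⟩ := p
          rw [hbs] at h0; simp at h0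
          have hlt := bSingle_rest_lt cs (cur ++ ['\'']) cur' rest hbs
          simp [hbs, h0, ih rest items cur' bd brd (by omega)]
      · by_cases h2 : c = '"'
        · subst h2
          rw [bLoop_cons_double]
          have h0 := aLoop_double cs items (cur ++ ['"']) bd brd
          conv_lhs => rw [aLoop.eq_def]
          cases hbs : bDouble cs (cur ++ ['"']) with
          | none =>
            rw [hbs] at h0; simp at h0
            simp [hbs, bFinish, h0]
          | some p =>
            obtain ⟨cur', rest⟩ := p
            rw [hbs] at h0; simp at h0
            have hlt := bDouble_rest_lt cs (cur ++ ['"']) cur' rest hbs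
            simp [hbs, h0, ih rest items cur' bd brd (by omega)]
        · rw [aLoop.eq_def, bLoop.eq_def]
          by_cases h3 : c = '['
          · simp [h2, h3]
            exact ih _ _ _ _ _ hle'
          · by_cases h4 : c = ']'
            · by_cases hbd : bd = 0
              · simp [h2, h4, hbd, aFinish, bFinish]
              · simp [h2, h4, hbd]
                exact ih _ _ _ _ _ hle'
            · by_cases h5 : c = '{'
              · simp [h2, h5]
                exact ih _ _ _ _ _ hle'
              · by_cases h6 : c = '}'
                · by_cases hbr : brd = 0
                  · simp [h2, h6, hbr, aFinish, bFinish]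
                  · simp [h2, h6, hbr]
                    exact ih _ _ _ _ _ hle'
                · by_cases h7 : c = ',' ∧ bd = 0 ∧ brd = 0
                  · by_cases hit : PySem.Chars.strip cur = []
                    · simp [h2, h7, hit, aFinish, bFinish]
                    · simp [h2, h7, hit]
                      exact ih _ _ _ _ _ hle'
                  · simp [h1, h2, h3, h4, h5, h6, h7]
                    exact ih _ _ _ _ _ hle'

theorem main_sim (cs : List Char) (items : List String) (cur : List Char) (bd brd : Nat) :
    aFinish (aLoop cs items cur false false false bd brd) =
      bFinish (bLoop cs items cur bd brd) :=
  main_sim_aux cs.length cs items cur bd brd (Nat.le_refl _)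

-- ===== VERDICT (by name: the statement is the Claim_ definition above) =====
theorem split_inline_yaml_sequence_py_spec : Claim_equal_split_inline_yaml_sequence_py := by
  intro value _ _
  unfold Spec_split_inline_yaml_sequence_py split_inline_yaml_sequence_py split_inline_yaml_sequence_py_alt
  exact main_sim value.toList [] [] 0 0
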